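-- pv_equiv track=rewrite | github.com/ckoons/BubbleSpacetimeTheory | play/toy_1158_bernoulli_thermodynamics_bridge_bst.py | bst_decomp
-- ===== SOURCE A (Python) =====
-- def bst_decomp(n):
--     if n <= 1:
--         return str(n)
--     factors = {}
--     temp = n
--     for p in [2, 3, 5, 7]:
--         while temp % p == 0:
--             factors[p] = factors.get(p, 0) + 1
--             temp //= p
--     if temp > 1:
--         return None
--     parts = []
--     for p, e in sorted(factors.items()):
--         name = {2: "rank", 3: "N_c", 5: "n_C", 7: "g"}.get(p, str(p))
--         parts.append(name if e == 1 else f"{name}^{e}")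
--     return " × ".join(parts)
-- ===== SOURCE B (Python) =====
-- def bst_decomp(n):
--     if n <= 1:
--         return str(n)
--
--     def extract(m, p):
--         """Largest e with p**e | m, and m // p**e, by recursive exponent doubling:
--         the exponent of p in m is twice the exponent of p*p, plus at most one."""
--         if m % p != 0:
--             return 0, m
--         e, m = extract(m, p * p)
--         e *= 2
--         if m % p == 0:
--             e += 1
--             m //= p
--         return e, m
--
--     temp = n
--     parts = []
--     for p, name in ((2, "rank"), (3, "N_c"), (5, "n_C"), (7, "g")):
--         e, temp = extract(temp, p)
--         if e:
--             parts.append(name if e == 1 else f"{name}^{e}")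
--     return None if temp > 1 else " × ".join(parts)
-- ===== Notes on version B (the rewrite author's own statement) =====
-- stated objective: alternative
-- what changed: Replaces A's per-prime repeated-division while loop plus factors dict plus sorted(items) plus label-dict lookup by a recursive exponent-doubling extractor (the exponent of p is twice the exponent of p*p, plus at most one trailing division), fused with direct label emission over the fixed (prime, label) tuples, so the number of divisions per prime is O(log e) instead of e.
import Mathlib
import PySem

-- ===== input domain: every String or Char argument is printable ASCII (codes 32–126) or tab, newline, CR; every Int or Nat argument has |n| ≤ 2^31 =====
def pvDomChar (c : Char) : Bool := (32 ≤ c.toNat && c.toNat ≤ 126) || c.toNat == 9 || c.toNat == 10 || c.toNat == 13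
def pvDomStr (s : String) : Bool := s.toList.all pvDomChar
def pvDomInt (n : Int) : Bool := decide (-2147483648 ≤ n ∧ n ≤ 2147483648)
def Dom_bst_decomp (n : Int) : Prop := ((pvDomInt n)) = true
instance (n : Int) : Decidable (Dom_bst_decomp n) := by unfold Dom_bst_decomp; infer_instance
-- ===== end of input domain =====

-- B replaces A's per-prime while-division loop + factors dict + sorted pass by a recursive
-- exponent-doubling extractor (exponent of p = 2 * exponent of p*p, plus at most one) fused
-- with direct label emission over the fixed (prime, label) pairs (alternative algorithm).


-- ===== PORT A =====
-- A's inner 'while temp % p == 0' loop, updating the factors dict; fuel bounds the number of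
-- condition checks (n.toNat is always enough on A's domain, since checks ≤ log2 n + 1 ≤ n).
def bstWhileA (p : Int) : Nat → Int × PySem.Dict Int Int → Int × PySem.Dict Int Int
  | 0, st => st
  | fuel+1, (temp, factors) =>
    if PySem.Int.mod temp p = 0 then
      bstWhileA p fuel (PySem.Int.floordiv temp p, factors.insert p (factors.getD p 0 + 1))
    else (temp, factors)

def bst_decomp (n : Int) : Option String :=
  if n ≤ 1 then some (PySem.Int.toStr n)
  else
    let st := [(2:Int), 3, 5, 7].foldl (fun st p => bstWhileA p n.toNat st) (n, PySem.Dict.empty)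
    if st.1 > 1 then none
    else
      let parts := (PySem.List.sorted2 st.2.items Prod.fst Prod.snd).foldl
        (fun parts pe =>
          let name := (PySem.Dict.ofList [((2:Int), "rank"), (3, "N_c"), (5, "n_C"), (7, "g")]).getD
            pe.1 (PySem.Int.toStr pe.1)
          parts ++ [if pe.2 = 1 then name else name ++ "^" ++ PySem.Int.toStr pe.2])
        ([] : List String)
      some (PySem.Str.join " × " parts)

-- ===== PORT B =====
-- B's recursive 'extract(m, p)': largest e with p^e | m and the cofactor, by exponent doubling;
-- fuel bounds the recursion depth (n.toNat is always enough: depth ≤ log2 log2 n + 1).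
def bstExtract : Nat → Int → Int → Int × Int
  | 0, m, _ => (0, m)
  | fuel+1, m, p =>
    if PySem.Int.mod m p = 0 then
      let r := bstExtract fuel m (p * p)
      let e := 2 * r.1
      if PySem.Int.mod r.2 p = 0 then (e + 1, PySem.Int.floordiv r.2 p) else (e, r.2)
    else (0, m)

def bst_decomp_alt (n : Int) : Option String :=
  if n ≤ 1 then some (PySem.Int.toStr n)
  else
    let st := [((2:Int), "rank"), (3, "N_c"), (5, "n_C"), (7, "g")].foldl
      (fun (st : Int × List String) pn =>
        let et := bstExtract n.toNat st.1 pn.1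
        (et.2, if et.1 = 0 then st.2
               else st.2 ++ [if et.1 = 1 then pn.2 else pn.2 ++ "^" ++ PySem.Int.toStr et.1]))
      (n, ([] : List String))
    if st.1 > 1 then none else some (PySem.Str.join " × " st.2)

-- ===== PRECONDITION & SPEC =====
def Spec_bst_decomp (n : Int) (out : Option String) : Prop := out = bst_decomp_alt n
instance (n : Int) (out : Option String) : Decidable (Spec_bst_decomp n out) := by unfold Spec_bst_decomp; infer_instance

-- ===== CLAIM (what is proved, stated in full; the proofs are below) =====
def Claim_equal_bst_decomp : Prop := ∀ (n : Int), Dom_bst_decomp n → Spec_bst_decomp n (bst_decomp n)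

-- ===== LEMMAS AND PROOFS =====

-- Proof-only reference loop: A's while loop with the dict replaced by a bare exponent counter.
def bstWhileB (p : Int) : Nat → Int × Int → Int × Int
  | 0, st => st
  | fuel+1, (temp, e) =>
    if PySem.Int.mod temp p = 0 then
      bstWhileB p fuel (PySem.Int.floordiv temp p, e + 1)
    else (temp, e)

theorem bstWhileB_count_ge (p : Int) : ∀ (fuel : Nat) (temp c : Int),
    c ≤ (bstWhileB p fuel (temp, c)).2 := by
  intro fuel
  induction fuel with
  | zero => intro temp c; simp [bstWhileB]
  | succ f ih =>
    intro temp c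
    simp only [bstWhileB]
    split
    · exact le_trans (by omega) (ih _ (c + 1))
    · simp

theorem whileAB (p : Int) : ∀ (fuel : Nat) (temp c : Int) (d : PySem.Dict Int Int),
    bstWhileA p fuel (temp, d)
      = ((bstWhileB p fuel (temp, c)).1,
         if (bstWhileB p fuel (temp, c)).2 = c then d
         else d.insert p (d.getD p 0 + ((bstWhileB p fuel (temp, c)).2 - c))) := by
  intro fuel
  induction fuel with
  | zero => intro temp c d; simp [bstWhileA, bstWhileB]
  | succ f ih =>
    intro temp c d
    simp only [bstWhileA, bstWhileB]
    split
    · rw [ih _ (c + 1) (d.insert p (d.getD p 0 + 1))]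
      have hge := bstWhileB_count_ge p f (PySem.Int.floordiv temp p) (c + 1)
      set e := (bstWhileB p f (PySem.Int.floordiv temp p, c + 1)).2 with he
      refine congrArg _ ?_
      by_cases h1 : e = c + 1
      · simp [h1, show ¬ (c + 1 = c) by omega]
      · rw [if_neg h1, if_neg (by omega)]
        rw [PySem.Dict.getD_insert_self, PySem.Dict.insert_insert_self]
        congr 1
        omega
    · simp

-- The while loop computes THE factorization m = p^k * t with p ∤ t.
theorem whileB_sound (p : Int) (hp : 2 ≤ p) : ∀ (fuel : Nat) (m c : Int), 0 < m → m.toNat ≤ fuel →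
    ∃ k : Nat, (bstWhileB p fuel (m, c)).2 = c + k ∧
      m = p ^ k * (bstWhileB p fuel (m, c)).1 ∧
      ¬ p ∣ (bstWhileB p fuel (m, c)).1 ∧ 0 < (bstWhileB p fuel (m, c)).1 := by
  intro fuel
  induction fuel with
  | zero => intro m c hm hf; omega
  | succ f ih =>
    intro m c hm hf
    simp only [bstWhileB]
    by_cases h : PySem.Int.mod m p = 0
    · rw [if_pos h]
      have hdvd : p ∣ m := (PySem.Int.mod_eq_zero_iff_dvd m p).mp h
      have heq : PySem.Int.floordiv m p * p = m := by
        have := PySem.Int.floordiv_mul_add_mod m p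
        omega
      have hm' : 0 < PySem.Int.floordiv m p := by nlinarith
      have hlt : PySem.Int.floordiv m p < m := by nlinarith
      obtain ⟨k, h1, h2, h3, h4⟩ := ih (PySem.Int.floordiv m p) (c + 1) hm' (by omega)
      exact ⟨k + 1, by omega, by rw [pow_succ]; nlinarith [h2], h3, h4⟩
    · rw [if_neg h]
      exact ⟨0, by simp, by simp, fun hd => h ((PySem.Int.mod_eq_zero_iff_dvd m p).mpr hd), hm⟩

-- The doubling extractor computes the same factorization (given enough fuel: m < p^(2^fuel)).
theorem extract_sound : ∀ (fuel : Nat) (p m : Int), 2 ≤ p → 0 < m → m < p ^ (2 ^ fuel) →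
    ∃ k : Nat, (bstExtract fuel m p).1 = (k : Int) ∧
      m = p ^ k * (bstExtract fuel m p).2 ∧
      ¬ p ∣ (bstExtract fuel m p).2 ∧ 0 < (bstExtract fuel m p).2 := by
  intro fuel
  induction fuel with
  | zero =>
    intro p m hp hm hb
    refine ⟨0, rfl, by simp [bstExtract], fun hd => ?_, hm⟩
    · have := Int.le_of_dvd hm hd
      simp [pow_zero, pow_one] at hb
      omega
  | succ f ih =>
    intro p m hp hm hb
    simp only [bstExtract]
    by_cases h : PySem.Int.mod m p = 0
    · rw [if_pos h]
      have hb' : m < (p * p) ^ (2 ^ f) := by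
        have : (p * p) ^ (2 ^ f) = p ^ (2 ^ (f + 1)) := by
          rw [← pow_two, ← pow_mul, pow_succ, Nat.mul_comm]
        omega
      obtain ⟨k2, h1, h2, h3, h4⟩ := ih (p * p) m (by nlinarith) hm hb'
      by_cases h5 : PySem.Int.mod (bstExtract f m (p * p)).2 p = 0
      · rw [if_pos h5]
        set t2 := (bstExtract f m (p * p)).2 with ht2
        have hdvd : p ∣ t2 := (PySem.Int.mod_eq_zero_iff_dvd t2 p).mp h5
        have heq : PySem.Int.floordiv t2 p * p = t2 := by
          have := PySem.Int.floordiv_mul_add_mod t2 p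
          omega
        have ht' : 0 < PySem.Int.floordiv t2 p := by nlinarith
        refine ⟨2 * k2 + 1, by push_cast; omega, ?_, fun hd => h3 ?_, ht'⟩
        · have : (p * p) ^ k2 = p ^ (2 * k2) := by
            rw [← pow_two, ← pow_mul]
          rw [pow_succ, ← this]
          nlinarith [h2]
        · obtain ⟨u, hu⟩ := hd
          exact ⟨u, by nlinarith⟩
      · rw [if_neg h5]
        refine ⟨2 * k2, by push_cast; omega, ?_,
          fun hd => h5 ((PySem.Int.mod_eq_zero_iff_dvd _ p).mpr hd), h4⟩
        have : (p * p) ^ k2 = p ^ (2 * k2) := by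
          rw [← pow_two, ← pow_mul]
        simpa [← this] using h2
    · rw [if_neg h]
      exact ⟨0, rfl, by simp, fun hd => h ((PySem.Int.mod_eq_zero_iff_dvd m p).mpr hd), hm⟩

-- Uniqueness of the factorization m = p^k * t, p ∤ t.
theorem pow_factor_unique (p : Int) (hp : 2 ≤ p) : ∀ (a : Nat) (b : Nat) (t1 t2 : Int),
    0 < t1 → 0 < t2 → ¬ p ∣ t1 → ¬ p ∣ t2 → p ^ a * t1 = p ^ b * t2 → a = b ∧ t1 = t2 := by
  intro a
  induction a with
  | zero =>
    intro b t1 t2 h1 h2 h3 h4 heq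
    cases b with
    | zero => simp at heq; exact ⟨rfl, heq⟩
    | succ b' =>
      exfalso
      exact h3 ⟨p ^ b' * t2, by linear_combination heq⟩
  | succ a' ih =>
    intro b t1 t2 h1 h2 h3 h4 heq
    cases b with
    | zero =>
      exfalso
      exact h4 ⟨p ^ a' * t1, by linear_combination -heq⟩
    | succ b' =>
      have hp0 : p ≠ 0 := by omega
      have : p ^ a' * t1 = p ^ b' * t2 := by
        apply mul_left_cancel₀ hp0
        linear_combination heq
      obtain ⟨hab, ht⟩ := ih b' t1 t2 h1 h2 h3 h4 this
      exact ⟨by omega, ht⟩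

-- Enough fuel for the extractor on the domain: m ≤ fuel (as Nat) gives m < p^(2^fuel).
theorem fuel_big (p m : Int) (fuel : Nat) (hp : 2 ≤ p) (h0 : 0 ≤ m) (hm : m.toNat ≤ fuel) :
    m < p ^ (2 ^ fuel) := by
  have h1 : (fuel : Int) < 2 ^ fuel := by exact_mod_cast Nat.lt_two_pow_self
  have h2 : (2 : Int) ^ fuel ≤ 2 ^ (2 ^ fuel) := by
    apply pow_le_pow_right₀ (by norm_num)
    exact Nat.le_of_lt Nat.lt_two_pow_self
  have h3 : (2 : Int) ^ (2 ^ fuel) ≤ p ^ (2 ^ fuel) :=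
    pow_le_pow_left₀ (by norm_num) hp _
  omega

-- The extractor equals (swapped) the reference while loop.
theorem extract_eq_whileB (p m : Int) (fuel : Nat) (hp : 2 ≤ p) (hm : 0 < m)
    (hf : m.toNat ≤ fuel) :
    bstExtract fuel m p = ((bstWhileB p fuel (m, 0)).2, (bstWhileB p fuel (m, 0)).1) := by
  obtain ⟨k1, w1, w2, w3, w4⟩ := whileB_sound p hp fuel m 0 hm hf
  obtain ⟨k2, e1, e2, e3, e4⟩ := extract_sound fuel p m hp hm (fuel_big p m fuel hp (by omega) hf)
  obtain ⟨hk, ht⟩ := pow_factor_unique p hp k2 k1 _ _ e4 w4 e3 w3 (by rw [← e2, ← w2])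
  have : (bstExtract fuel m p).1 = (bstWhileB p fuel (m, 0)).2 := by rw [e1, hk]; omega
  exact Prod.ext this ht

-- Cofactor facts needed to chain the four stages.
theorem whileB_res (p m : Int) (fuel : Nat) (hp : 2 ≤ p) (hm : 0 < m) (hf : m.toNat ≤ fuel) :
    0 < (bstWhileB p fuel (m, 0)).1 ∧ (bstWhileB p fuel (m, 0)).1 ≤ m := by
  obtain ⟨k, _, h2, _, h4⟩ := whileB_sound p hp fuel m 0 hm hf
  refine ⟨h4, ?_⟩
  have hpk : (1 : Int) ≤ p ^ k := one_le_pow₀ (by omega)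
  nlinarith

-- ===== VERDICT (by name: the statement is the Claim_ definition above) =====
theorem bst_decomp_spec : Claim_equal_bst_decomp := by
  intro n _
  unfold Spec_bst_decomp bst_decomp bst_decomp_alt
  by_cases h1 : n ≤ 1
  · simp [h1]
  · simp only [if_neg h1, List.foldl]
    have hn : 0 < n := by omega
    have hfn : n.toNat ≤ n.toNat := le_refl _
    obtain ⟨p1pos, p1le⟩ := whileB_res 2 n n.toNat (by omega) hn hfn
    have hf1 : (bstWhileB 2 n.toNat (n, 0)).1.toNat ≤ n.toNat := by omega
    obtain ⟨p2pos, p2le⟩ := whileB_res 3 _ n.toNat (by omega) p1pos hf1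
    have hf2 : (bstWhileB 3 n.toNat ((bstWhileB 2 n.toNat (n, 0)).1, 0)).1.toNat ≤ n.toNat := by omega
    obtain ⟨p3pos, p3le⟩ := whileB_res 5 _ n.toNat (by omega) p2pos hf2
    have hf3 : (bstWhileB 5 n.toNat ((bstWhileB 3 n.toNat ((bstWhileB 2 n.toNat (n, 0)).1, 0)).1, 0)).1.toNat ≤ n.toNat := by omega
    rw [whileAB 2 n.toNat n 0 PySem.Dict.empty]
    rw [whileAB 3 n.toNat _ 0 _]
    rw [whileAB 5 n.toNat _ 0 _]
    rw [whileAB 7 n.toNat _ 0 _]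
    rw [extract_eq_whileB 2 n n.toNat (by omega) hn hfn]
    rw [extract_eq_whileB 3 _ n.toNat (by omega) p1pos hf1]
    rw [extract_eq_whileB 5 _ n.toNat (by omega) p2pos hf2]
    rw [extract_eq_whileB 7 _ n.toNat (by omega) p3pos hf3]
    generalize (bstWhileB 2 n.toNat (n, 0)).2 = e2
    generalize (bstWhileB 2 n.toNat (n, 0)).1 = t1
    generalize (bstWhileB 3 n.toNat (t1, 0)).2 = e3
    generalize (bstWhileB 3 n.toNat (t1, 0)).1 = t2
    generalize (bstWhileB 5 n.toNat (t2, 0)).2 = e5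
    generalize (bstWhileB 5 n.toNat (t2, 0)).1 = t3
    generalize (bstWhileB 7 n.toNat (t3, 0)).2 = e7
    generalize (bstWhileB 7 n.toNat (t3, 0)).1 = t4
    simp only [Int.sub_zero]
    by_cases h2 : e2 = 0 <;> by_cases h3 : e3 = 0 <;> by_cases h5 : e5 = 0 <;> by_cases h7 : e7 = 0 <;>
      simp [h2, h3, h5, h7, PySem.List.sorted2, PySem.List.insertBy, PySem.Dict.insert,
            PySem.Dict.empty, PySem.Dict.getD, PySem.Dict.get?, PySem.Dict.ofList,
            PySem.Dict.update, List.find?]
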